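-- pv_equiv track=rewrite | github.com/mutalyzer/mutalyzer2 | mutalyzer/describe.py | LCSMatrix
-- ===== SOURCE A (Python) =====
-- def LCSMatrix(s1, s2):
--     """
--     Calculate the Longest Common Substring matrix.
--
--     @arg s1: A string.
--     @type s1: str
--     @arg s2: A string.
--     @type s2: str
--
--     @returns: A matrix with the LCS of {s1}[i], {s2}[j] at position i, j.
--     @rval: list[list[int]]
--     """
--     y_max = len(s1) + 1
--     x_max = len(s2) + 1
--     M = [[0] * x_max for i in range(y_max)]
--
--     for x in range(1, y_max):
--         for y in range(1, x_max):
--             if s1[x - 1] == s2[y - 1]: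
--                 M[x][y] = M[x - 1][y - 1] + 1
--
--     return M
-- ===== SOURCE B (Python) =====
-- def LCSMatrix(s1, s2):
--     """Diagonal traversal: walk each diagonal with a running match counter
--     instead of reading the up-left neighbour row-major."""
--     m = len(s1)
--     n = len(s2)
--     M = [[0] * (n + 1) for _ in range(m + 1)]
--
--     def walk(x, y):
--         run = 0
--         while x <= m and y <= n:
--             run = run + 1 if s1[x - 1] == s2[y - 1] else 0
--             M[x][y] = run
--             x += 1
--             y += 1
--
--     for x0 in range(1, m + 1):
--         walk(x0, 1)
--     for y0 in range(2, n + 1):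
--         walk(1, y0)
--
--     return M
-- ===== Notes on version B (the rewrite author's own statement) =====
-- stated objective: alternative
-- what changed: B fills the matrix diagonal-by-diagonal with a running match counter carried along each diagonal, instead of A's row-major sweep that reads the up-left matrix cell.
import Mathlib
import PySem

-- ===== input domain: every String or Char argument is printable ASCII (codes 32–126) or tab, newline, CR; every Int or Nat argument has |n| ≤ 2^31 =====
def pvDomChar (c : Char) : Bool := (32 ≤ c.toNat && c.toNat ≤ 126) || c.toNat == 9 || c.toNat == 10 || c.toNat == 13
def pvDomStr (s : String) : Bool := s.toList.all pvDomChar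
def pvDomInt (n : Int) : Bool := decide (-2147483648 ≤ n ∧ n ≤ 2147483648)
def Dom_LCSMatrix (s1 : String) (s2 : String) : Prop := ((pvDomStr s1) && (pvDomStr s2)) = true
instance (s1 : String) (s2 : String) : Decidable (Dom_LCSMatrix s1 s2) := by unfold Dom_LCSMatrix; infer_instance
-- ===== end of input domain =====

-- B fills the matrix diagonal-by-diagonal with a running match counter, instead of A's
-- row-major sweep reading the up-left cell; same cost, alternative decomposition.

-- shared 2-D list access helpers (all indices used by the ports are provably in range,
-- so getD/set are exact renderings of Python's M[x][y] reads and writes)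
def get2 (M : List (List Int)) (i j : Nat) : Int := (M.getD i []).getD j 0
def set2 (M : List (List Int)) (i j : Nat) (v : Int) : List (List Int) :=
  M.set i ((M.getD i []).set j v)

-- ===== PORT A =====
def LCSMatrix (s1 : String) (s2 : String) : List (List Int) :=
  let a := s1.toList
  let b := s2.toList
  let y_max := a.length + 1
  let x_max := b.length + 1
  let M0 : List (List Int) := (List.range y_max).map (fun _ => List.replicate x_max 0)
  (List.range' 1 a.length).foldl (fun M x =>
    (List.range' 1 b.length).foldl (fun M y =>
      if a.getD (x - 1) ' ' = b.getD (y - 1) ' ' then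
        set2 M x y (get2 M (x - 1) (y - 1) + 1)
      else M) M) M0

-- ===== PORT B =====
-- the inner `while x <= m and y <= n` loop of Source B's `walk`
def walk (a b : List Char) (m n : Nat) (M : List (List Int)) (x y : Nat) (run : Int) :
    List (List Int) :=
  if _h : x ≤ m ∧ y ≤ n then
    let run' : Int := if a.getD (x - 1) ' ' = b.getD (y - 1) ' ' then run + 1 else 0
    walk a b m n (set2 M x y run') (x + 1) (y + 1) run'
  else M
termination_by m + 1 - x
decreasing_by omega

def LCSMatrix_alt (s1 : String) (s2 : String) : List (List Int) :=
  let a := s1.toList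
  let b := s2.toList
  let m := a.length
  let n := b.length
  let M0 : List (List Int) := (List.range (m + 1)).map (fun _ => List.replicate (n + 1) 0)
  let M1 := (List.range' 1 m).foldl (fun M x0 => walk a b m n M x0 1 0) M0
  (List.range' 2 (n - 1)).foldl (fun M y0 => walk a b m n M 1 y0 0) M1

-- ===== PRECONDITION & SPEC =====
def Spec_LCSMatrix (s1 : String) (s2 : String) (out : List (List Int)) : Prop := out = LCSMatrix_alt s1 s2
instance (s1 : String) (s2 : String) (out : List (List Int)) : Decidable (Spec_LCSMatrix s1 s2 out) := by unfold Spec_LCSMatrix; infer_instance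

-- ===== CLAIM (what is proved, stated in full; the proofs are below) =====
def Claim_equal_LCSMatrix : Prop := ∀ (s1 : String) (s2 : String), Dom_LCSMatrix s1 s2 → Spec_LCSMatrix s1 s2 (LCSMatrix s1 s2)

-- ===== LEMMAS AND PROOFS =====

-- the intended cell value: length of the common suffix of a.take x and b.take y
def lcsf (a b : List Char) : Nat → Nat → Int
  | 0, _ => 0
  | _ + 1, 0 => 0
  | x + 1, y + 1 => if a.getD x ' ' = b.getD y ' ' then lcsf a b x y + 1 else 0

lemma lcsf_zero_right (a b : List Char) (x : Nat) : lcsf a b x 0 = 0 := by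
  cases x <;> rfl

-- an (m+1)×(n+1) matrix generated by a cell function
def rmat (m n : Nat) (g : Nat → Nat → Int) : List (List Int) :=
  (List.range (m + 1)).map (fun i => (List.range (n + 1)).map (g i))

lemma rmat_congr {m n : Nat} {g g' : Nat → Nat → Int}
    (h : ∀ i, i ≤ m → ∀ j, j ≤ n → g i j = g' i j) : rmat m n g = rmat m n g' := by
  unfold rmat
  apply List.map_congr_left
  intro i hi
  apply List.map_congr_left
  intro j hj
  simp only [List.mem_range] at hi hj
  exact h i (by omega) j (by omega)

lemma zero_mat_eq_rmat (m n : Nat) :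
    ((List.range (m + 1)).map (fun _ => List.replicate (n + 1) (0 : Int)))
      = rmat m n (fun _ _ => 0) := by
  unfold rmat
  apply List.map_congr_left
  intro i _
  apply List.ext_getElem (by simp)
  intro j h1 h2
  simp

lemma map_range_set {α : Type} (N x : Nat) (_hx : x < N) (f : Nat → α) (v : α) :
    (List.map f (List.range N)).set x v
      = List.map (fun i => if i = x then v else f i) (List.range N) := by
  apply List.ext_getElem (by simp)
  intro i h1 h2
  simp only [List.length_map, List.length_range] at h2
  rw [List.getElem_set, List.getElem_map, List.getElem_range]
  rcases eq_or_ne i x with h | h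
  · simp [h]
  · simp [h, Ne.symm h]

lemma rmat_getD {m n i : Nat} (g : Nat → Nat → Int) (hi : i ≤ m) :
    (rmat m n g).getD i [] = List.map (g i) (List.range (n + 1)) := by
  unfold rmat
  rw [List.getD_eq_getElem?_getD, List.getElem?_map, List.getElem?_range (by omega)]
  rfl

lemma get2_rmat {m n i j : Nat} (g : Nat → Nat → Int) (hi : i ≤ m) (hj : j ≤ n) :
    get2 (rmat m n g) i j = g i j := by
  unfold get2
  rw [rmat_getD g hi, List.getD_eq_getElem?_getD, List.getElem?_map,
    List.getElem?_range (by omega)]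
  rfl

lemma set2_rmat {m n i j : Nat} (g : Nat → Nat → Int) (v : Int) (hi : i ≤ m) (hj : j ≤ n) :
    set2 (rmat m n g) i j v
      = rmat m n (fun i' j' => if i' = i ∧ j' = j then v else g i' j') := by
  unfold set2
  rw [rmat_getD g hi, map_range_set (n + 1) j (by omega)]
  show (rmat m n g).set i _ = _
  unfold rmat
  rw [map_range_set (m + 1) i (by omega)]
  apply List.map_congr_left
  intro i' _
  rcases eq_or_ne i' i with h | h
  · subst h
    rw [if_pos rfl]
    apply List.map_congr_left
    intro j' _
    rcases eq_or_ne j' j with h2 | h2 <;> simp [h2]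
  · simp only [if_neg h]
    apply List.map_congr_left
    intro j' _
    simp [h]

-- B's diagonal walk writes lcsf along its diagonal
lemma walk_eq (a b : List Char) : ∀ (k x y : Nat) (g : Nat → Nat → Int) (run : Int),
    a.length + 1 - x = k → 1 ≤ x → 1 ≤ y → run = lcsf a b (x - 1) (y - 1) →
    walk a b a.length b.length (rmat a.length b.length g) x y run
      = rmat a.length b.length (fun i j =>
          if x ≤ i ∧ i ≤ a.length ∧ y ≤ j ∧ j ≤ b.length ∧ i - x = j - y
          then lcsf a b i j else g i j) := by
  intro k
  induction k with
  | zero =>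
    intro x y g run hk hx hy _
    rw [walk]
    rw [dif_neg (by omega)]
    apply rmat_congr
    intro i hi j hj
    rw [if_neg (by omega)]
  | succ k ih =>
    intro x y g run hk hx hy hrun
    rw [walk]
    by_cases hc : x ≤ a.length ∧ y ≤ b.length
    · rw [dif_pos hc]
      have hrun' : (if a.getD (x - 1) ' ' = b.getD (y - 1) ' ' then run + 1 else 0)
          = lcsf a b x y := by
        have hx' : x = (x - 1) + 1 := by omega
        have hy' : y = (y - 1) + 1 := by omega
        rw [hrun]
        conv_rhs => rw [hx', hy']
        rw [lcsf]
      simp only []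
      rw [hrun']
      rw [set2_rmat _ _ hc.1 hc.2]
      rw [ih (x + 1) (y + 1) _ _ (by omega) (by omega) (by omega)
        (by simp only [Nat.add_sub_cancel])]
      apply rmat_congr
      intro i hi j hj
      by_cases hd : x ≤ i ∧ i ≤ a.length ∧ y ≤ j ∧ j ≤ b.length ∧ i - x = j - y
      · rw [if_pos hd]
        by_cases he : x + 1 ≤ i ∧ i ≤ a.length ∧ y + 1 ≤ j ∧ j ≤ b.length ∧
            i - (x + 1) = j - (y + 1)
        · rw [if_pos he]
        · rw [if_neg he, if_pos (by omega)]
          have : i = x ∧ j = y := by omega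
          rw [this.1, this.2]
      · rw [if_neg hd, if_neg (by omega), if_neg (by omega)]
    · rw [dif_neg hc]
      apply rmat_congr
      intro i hi j hj
      rw [if_neg (by omega)]

-- after the first pass of diagonals (starts in column 1): lower triangle filled
lemma fold1_eq (a b : List Char) : ∀ (k : Nat), k ≤ a.length →
    (List.range' 1 k).foldl (fun M x0 => walk a b a.length b.length M x0 1 0)
        (rmat a.length b.length (fun _ _ => 0))
      = rmat a.length b.length (fun i j =>
          if 1 ≤ j ∧ j ≤ b.length ∧ j ≤ i ∧ i ≤ a.length ∧ i - j < k
          then lcsf a b i j else 0) := by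
  intro k
  induction k with
  | zero =>
    intro _
    simp only [List.range', List.foldl_nil]
    apply rmat_congr
    intro i hi j hj
    rw [if_neg (by omega)]
  | succ k ih =>
    intro hk
    rw [List.range'_concat, List.foldl_append, List.foldl_cons, List.foldl_nil]
    simp only [one_mul]
    rw [ih (by omega)]
    rw [walk_eq a b (a.length + 1 - (1 + k)) (1 + k) 1 _ 0 rfl (by omega) (by omega)
      (by rw [Nat.add_sub_cancel_left]; exact (lcsf_zero_right a b k).symm)]
    apply rmat_congr
    intro i hi j hj
    by_cases h1 : 1 + k ≤ i ∧ i ≤ a.length ∧ 1 ≤ j ∧ j ≤ b.length ∧ i - (1 + k) = j - 1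
    · rw [if_pos h1, if_pos (by omega)]
    · rw [if_neg h1]
      by_cases h2 : 1 ≤ j ∧ j ≤ b.length ∧ j ≤ i ∧ i ≤ a.length ∧ i - j < k
      · rw [if_pos h2, if_pos (by omega)]
      · rw [if_neg h2, if_neg (by omega)]

-- after the second pass (starts in row 1, columns 2..n): whole matrix is lcsf
lemma fold2_eq (a b : List Char) (gT : Nat → Nat → Int) : ∀ (l : Nat), l ≤ b.length - 1 →
    (List.range' 2 l).foldl (fun M y0 => walk a b a.length b.length M 1 y0 0)
        (rmat a.length b.length gT)
      = rmat a.length b.length (fun i j =>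
          if 1 ≤ i ∧ i ≤ a.length ∧ j ≤ b.length ∧ 1 ≤ j - i ∧ j - i ≤ l
          then lcsf a b i j else gT i j) := by
  intro l
  induction l with
  | zero =>
    intro _
    simp only [List.range', List.foldl_nil]
    apply rmat_congr
    intro i hi j hj
    rw [if_neg (by omega)]
  | succ l ih =>
    intro hl
    rw [List.range'_concat, List.foldl_append, List.foldl_cons, List.foldl_nil]
    simp only [one_mul]
    rw [ih (by omega)]
    rw [walk_eq a b (a.length + 1 - 1) 1 (2 + l) _ 0 rfl (by omega) (by omega) rfl]
    apply rmat_congr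
    intro i hi j hj
    by_cases h1 : 1 ≤ i ∧ i ≤ a.length ∧ 2 + l ≤ j ∧ j ≤ b.length ∧ i - 1 = j - (2 + l)
    · rw [if_pos h1, if_pos (by omega)]
    · rw [if_neg h1]
      by_cases h2 : 1 ≤ i ∧ i ≤ a.length ∧ j ≤ b.length ∧ 1 ≤ j - i ∧ j - i ≤ l
      · rw [if_pos h2, if_pos (by omega)]
      · rw [if_neg h2, if_neg (by omega)]

lemma alt_eq_rmat (s1 s2 : String) :
    LCSMatrix_alt s1 s2 = rmat s1.toList.length s2.toList.length (lcsf s1.toList s2.toList) := by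
  unfold LCSMatrix_alt
  dsimp only
  rw [zero_mat_eq_rmat, fold1_eq s1.toList s2.toList s1.toList.length le_rfl,
    fold2_eq s1.toList s2.toList _ (s2.toList.length - 1) le_rfl]
  apply rmat_congr
  intro i hi j hj
  by_cases h1 : 1 ≤ i ∧ 1 ≤ j
  · by_cases h2 : j ≤ i
    · rw [if_neg (by omega), if_pos (by omega)]
    · rw [if_pos (by omega)]
  · rw [if_neg (by omega), if_neg (by omega)]
    have : i = 0 ∨ j = 0 := by omega
    rcases this with h | h
    · subst h; rfl
    · subst h; exact (lcsf_zero_right _ _ _).symm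

-- A's inner loop over y, for a fixed row x
lemma innerA_eq (a b : List Char) (x : Nat) (hx1 : 1 ≤ x) (hx : x ≤ a.length) :
    ∀ (k : Nat), k ≤ b.length →
    (List.range' 1 k).foldl (fun M y =>
        if a.getD (x - 1) ' ' = b.getD (y - 1) ' ' then
          set2 M x y (get2 M (x - 1) (y - 1) + 1)
        else M)
      (rmat a.length b.length (fun i j => if i < x then lcsf a b i j else 0))
      = rmat a.length b.length (fun i j =>
          if i < x ∨ (i = x ∧ j ≤ k) then lcsf a b i j else 0) := by
  intro k
  induction k with
  | zero =>
    intro _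
    simp only [List.range', List.foldl_nil]
    apply rmat_congr
    intro i hi j hj
    by_cases h1 : i < x
    · rw [if_pos h1, if_pos (Or.inl h1)]
    · rw [if_neg h1]
      by_cases h2 : i = x ∧ j ≤ 0
      · rw [if_pos (Or.inr h2)]
        have : j = 0 := by omega
        subst this
        exact (lcsf_zero_right a b i).symm
      · rw [if_neg (by tauto)]
  | succ k ih =>
    intro hk
    rw [List.range'_concat, List.foldl_append, List.foldl_cons, List.foldl_nil]
    simp only [one_mul]
    rw [ih (by omega)]
    have hidx : 1 + k - 1 = k := by omega
    have hval : lcsf a b x (1 + k)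
        = if a.getD (x - 1) ' ' = b.getD k ' ' then lcsf a b (x - 1) k + 1 else 0 := by
      have hx' : x = (x - 1) + 1 := by omega
      have hy' : 1 + k = k + 1 := by omega
      conv_lhs => rw [hx', hy']
      rw [lcsf]
    by_cases hch : a.getD (x - 1) ' ' = b.getD (1 + k - 1) ' '
    · rw [if_pos hch]
      simp only [hidx]
      rw [get2_rmat _ (by omega) (by omega)]
      rw [if_pos (Or.inl (by omega))]
      rw [hidx] at hch
      have hw : lcsf a b (x - 1) k + 1 = lcsf a b x (1 + k) := by rw [hval, if_pos hch]
      rw [hw]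
      rw [set2_rmat _ _ (by omega) (by omega)]
      apply rmat_congr
      intro i hi j hj
      by_cases h5 : i = x ∧ j = 1 + k
      · rw [if_pos h5, if_pos (by omega), h5.1, h5.2]
      · rw [if_neg h5]
        by_cases h6 : i < x ∨ (i = x ∧ j ≤ k)
        · rw [if_pos h6, if_pos (by omega)]
        · rw [if_neg h6, if_neg (by omega)]
    · rw [if_neg hch]
      rw [hidx] at hch
      apply rmat_congr
      intro i hi j hj
      by_cases h5 : i = x ∧ j = 1 + k
      · rw [if_neg (by omega), if_pos (by omega), h5.1, h5.2, hval, if_neg hch]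
      · by_cases h6 : i < x ∨ (i = x ∧ j ≤ k)
        · rw [if_pos h6, if_pos (by omega)]
        · rw [if_neg h6, if_neg (by omega)]

lemma outerA_eq (a b : List Char) : ∀ (k : Nat), k ≤ a.length →
    (List.range' 1 k).foldl (fun M x =>
        (List.range' 1 b.length).foldl (fun M y =>
          if a.getD (x - 1) ' ' = b.getD (y - 1) ' ' then
            set2 M x y (get2 M (x - 1) (y - 1) + 1)
          else M) M)
      (rmat a.length b.length (fun _ _ => 0))
      = rmat a.length b.length (fun i j => if i < k + 1 then lcsf a b i j else 0) := by
  intro k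
  induction k with
  | zero =>
    intro _
    simp only [List.range', List.foldl_nil]
    apply rmat_congr
    intro i hi j hj
    by_cases h1 : i < 1
    · rw [if_pos h1]
      have : i = 0 := by omega
      subst this
      rfl
    · rw [if_neg h1]
  | succ k ih =>
    intro hk
    rw [List.range'_concat, List.foldl_append, List.foldl_cons, List.foldl_nil]
    simp only [one_mul]
    rw [ih (by omega)]
    have hbase : (fun i j => if i < k + 1 then lcsf a b i j else (0 : Int))
        = fun i j => if i < 1 + k then lcsf a b i j else 0 := by
      funext i j
      rw [Nat.add_comm 1 k]
    rw [hbase]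
    rw [innerA_eq a b (1 + k) (by omega) (by omega) b.length le_rfl]
    apply rmat_congr
    intro i hi j hj
    by_cases h1 : i < 1 + k ∨ (i = 1 + k ∧ j ≤ b.length)
    · rw [if_pos h1, if_pos (by omega)]
    · rw [if_neg h1, if_neg (by omega)]

lemma a_eq_rmat (s1 s2 : String) :
    LCSMatrix s1 s2 = rmat s1.toList.length s2.toList.length (lcsf s1.toList s2.toList) := by
  unfold LCSMatrix
  dsimp only
  rw [zero_mat_eq_rmat, outerA_eq s1.toList s2.toList s1.toList.length le_rfl]
  apply rmat_congr
  intro i hi j hj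
  rw [if_pos (by omega)]

-- ===== VERDICT (by name: the statement is the Claim_ definition above) =====
theorem LCSMatrix_spec : Claim_equal_LCSMatrix := by
  intro s1 s2 _
  unfold Spec_LCSMatrix
  rw [a_eq_rmat, alt_eq_rmat]
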